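-- pv_equiv track=rewrite | github.com/REKATRON1/AdventOfCode23 | AdventOfCode23/Day_11/main.py | count_traversing_empty_columns
-- ===== SOURCE A (Python) =====
-- def count_traversing_empty_columns(galaxyA, galaxyB, empty_columns):
--     if galaxyA[1] == galaxyB[1]:
--         return 0
--     elif galaxyA[1] > galaxyB[1]:
--         (galaxyA, galaxyB) = (galaxyB, galaxyA)
--     counter = 0
--     for x in range(galaxyA[1]+1,galaxyB[1]):
--         if x in empty_columns:
--             counter += 1
--     return counter
-- ===== SOURCE B (Python) =====
-- def count_traversing_empty_columns(galaxyA, galaxyB, empty_columns):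
--     a, b = galaxyA[1], galaxyB[1]
--     lo, hi = (a, b) if a <= b else (b, a)
--     return len({c for c in empty_columns if lo < c < hi})
-- ===== Notes on version B (the rewrite author's own statement) =====
-- stated objective: faster
-- what changed: Instead of iterating over every integer in range(lo+1, hi) and membership-testing it against empty_columns, B makes one pass over empty_columns, collecting the distinct values strictly between the two x-coordinates into a set and returning its size.
import Mathlib
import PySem

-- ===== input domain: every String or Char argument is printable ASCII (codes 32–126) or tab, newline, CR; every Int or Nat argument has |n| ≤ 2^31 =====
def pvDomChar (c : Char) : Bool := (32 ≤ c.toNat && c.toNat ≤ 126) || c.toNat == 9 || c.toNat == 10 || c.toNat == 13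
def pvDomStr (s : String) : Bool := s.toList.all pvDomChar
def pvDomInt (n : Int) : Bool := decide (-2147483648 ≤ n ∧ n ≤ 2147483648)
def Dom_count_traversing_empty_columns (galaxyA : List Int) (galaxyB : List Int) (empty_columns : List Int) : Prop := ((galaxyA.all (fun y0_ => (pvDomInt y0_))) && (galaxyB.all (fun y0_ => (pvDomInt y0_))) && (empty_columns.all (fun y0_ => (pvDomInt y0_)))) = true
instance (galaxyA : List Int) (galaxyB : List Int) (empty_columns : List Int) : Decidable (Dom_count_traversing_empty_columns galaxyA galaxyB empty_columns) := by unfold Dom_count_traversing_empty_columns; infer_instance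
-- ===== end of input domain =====

-- B replaces A's scan of every integer in the gap (each membership-tested against
-- empty_columns) with a single pass over empty_columns counting the distinct values
-- strictly between the two x-coordinates: asymptotically faster.


-- ===== PORT A =====
def count_traversing_empty_columns (galaxyA : List Int) (galaxyB : List Int) (empty_columns : List Int) : Int :=
  match PySem.List.pyGet? galaxyA 1, PySem.List.pyGet? galaxyB 1 with
  | some a1, some b1 =>
    if a1 = b1 then 0
    else
      -- the tuple swap (galaxyA, galaxyB) = (galaxyB, galaxyA); only index [1] is read afterwards
      let a1' := if a1 > b1 then b1 else a1
      let b1' := if a1 > b1 then a1 else b1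
      (PySem.List.pyRange (a1' + 1) b1' 1).foldl
        (fun counter x => if x ∈ empty_columns then counter + 1 else counter) 0
  | _, _ => 0   -- IndexError: excluded by Pre_

-- ===== PORT B =====
def count_traversing_empty_columns_alt (galaxyA : List Int) (galaxyB : List Int) (empty_columns : List Int) : Int :=
  match PySem.List.pyGet? galaxyA 1 with
  | none => 0   -- IndexError: excluded by Pre_
  | some a =>
    match PySem.List.pyGet? galaxyB 1 with
    | none => 0   -- IndexError: excluded by Pre_
    | some b =>
      let lo := if a ≤ b then a else b
      let hi := if a ≤ b then b else a
      ((PySem.Set.ofList (empty_columns.filter (fun c => decide (lo < c) && decide (c < hi)))).length : Int)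

-- ===== PRECONDITION & SPEC =====
-- Pre_ excludes exactly the inputs where Python A raises IndexError: a galaxy list shorter than 2.
def Pre_count_traversing_empty_columns (galaxyA : List Int) (galaxyB : List Int) (empty_columns : List Int) : Prop :=
  2 ≤ galaxyA.length ∧ 2 ≤ galaxyB.length
instance (galaxyA : List Int) (galaxyB : List Int) (empty_columns : List Int) : Decidable (Pre_count_traversing_empty_columns galaxyA galaxyB empty_columns) := by unfold Pre_count_traversing_empty_columns; infer_instance

def pvWitness_count_traversing_empty_columns : List Int × List Int × List Int := ([0, 1], [0, 6], [2, 4, 4, 9])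

def Spec_count_traversing_empty_columns (galaxyA : List Int) (galaxyB : List Int) (empty_columns : List Int) (out : Int) : Prop := out = count_traversing_empty_columns_alt galaxyA galaxyB empty_columns
instance (galaxyA : List Int) (galaxyB : List Int) (empty_columns : List Int) (out : Int) : Decidable (Spec_count_traversing_empty_columns galaxyA galaxyB empty_columns out) := by unfold Spec_count_traversing_empty_columns; infer_instance

-- ===== CLAIM (what is proved, stated in full; the proofs are below) =====
def Claim_equal_count_traversing_empty_columns : Prop := ∀ (galaxyA : List Int) (galaxyB : List Int) (empty_columns : List Int), Dom_count_traversing_empty_columns galaxyA galaxyB empty_columns → Pre_count_traversing_empty_columns galaxyA galaxyB empty_columns → Spec_count_traversing_empty_columns galaxyA galaxyB empty_columns (count_traversing_empty_columns galaxyA galaxyB empty_columns)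

-- ===== LEMMAS AND PROOFS =====

-- A's counting loop is countP of the membership test over the range.
theorem pvFoldCount (ec l : List Int) (init : Int) :
    l.foldl (fun counter x => if x ∈ ec then counter + 1 else counter) init
      = init + (l.countP (fun x => decide (x ∈ ec)) : Int) := by
  induction l generalizing init with
  | nil => simp
  | cons y t ih =>
    simp only [List.foldl_cons, List.countP_cons, ih]
    by_cases h : y ∈ ec <;> simp [h] <;> omega

-- Core: the number of integers in (lo, hi) that lie in ec equals the number of
-- distinct elements of ec strictly between lo and hi.
theorem pvCore (ec : List Int) (lo hi : Int) :
    ((PySem.List.pyRange (lo + 1) hi 1).countP (fun x => decide (x ∈ ec)) : Int)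
      = ((PySem.Set.ofList (ec.filter (fun c => decide (lo < c) && decide (c < hi)))).length : Int) := by
  rw [List.countP_eq_length_filter]
  congr 1
  apply List.Perm.length_eq
  rw [List.perm_ext_iff_of_nodup]
  · intro x
    simp [List.mem_filter, PySem.Set.mem_ofList, PySem.List.mem_pyRange_one]
    constructor
    · rintro ⟨⟨h1, h2⟩, h3⟩; exact ⟨h3, by omega, h2⟩
    · rintro ⟨h3, h1, h2⟩; exact ⟨⟨by omega, h2⟩, h3⟩
  · exact List.Nodup.filter _ (PySem.List.nodup_pyRange_one _ _)
  · exact PySem.Set.nodup_ofList _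

-- ===== VERDICT (by name: the statement is the Claim_ definition above) =====
theorem count_traversing_empty_columns_spec : Claim_equal_count_traversing_empty_columns := by
  intro gA gB ec _ hpre
  obtain ⟨hA, hB⟩ := hpre
  obtain ⟨a0, a1, tA, rfl⟩ : ∃ a0 a1 tA, gA = a0 :: a1 :: tA := by
    match gA, hA with | a0 :: a1 :: t, _ => exact ⟨a0, a1, t, rfl⟩
  obtain ⟨b0, b1, tB, rfl⟩ : ∃ b0 b1 tB, gB = b0 :: b1 :: tB := by
    match gB, hB with | b0 :: b1 :: t, _ => exact ⟨b0, b1, t, rfl⟩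
  unfold Spec_count_traversing_empty_columns
  unfold count_traversing_empty_columns count_traversing_empty_columns_alt
  simp only [PySem.List.pyGet?, PySem.List.pyIdx?]
  norm_num
  by_cases heq : a1 = b1
  · subst heq
    simp only [le_refl, if_true]
    have hnil : ec.filter (fun c => decide (a1 < c) && decide (c < a1)) = [] := by
      apply List.filter_eq_nil_iff.mpr
      intro c _; simp; omega
    rw [hnil]
    simp [PySem.Set.ofList]
  · rw [if_neg heq, pvFoldCount, zero_add, pvCore]
    by_cases hgt : a1 > b1
    · rw [if_pos hgt, if_pos hgt, if_neg (show ¬ a1 ≤ b1 by omega), if_neg (show ¬ a1 ≤ b1 by omega)]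
    · rw [if_neg hgt, if_neg hgt, if_pos (show a1 ≤ b1 by omega), if_pos (show a1 ≤ b1 by omega)]
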